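-- pv_equiv track=rewrite | github.com/kar1shma/Final-Year-Project | generator.py | _generate_substitutions
-- ===== SOURCE A (Python) =====
-- from typing import List, Tuple, Optional, Dict, Set, Any, Union
--
-- CONSTANT_POOL: Dict[str, List[str]] = {
--     "person": ["alice", "bob", "carol", "dave", "eve", "frank", "george"],
--     "object": ["apple", "book", "ball", "car", "pencil", "phone"],
--     "entity": [
--         "alice", "bob", "carol", "dave", "eve", "frank", "george",
--         "apple", "book", "ball", "car", "pencil", "phone"
--     ],
-- }
--
-- def _generate_substitutions(vars_map: Dict[str, str]) -> List[Dict[str, str]]: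
--     if not vars_map:
--         return [{}]
--     name, typ = next(iter(vars_map.items()))
--     rest = vars_map.copy()
--     rest.pop(name)
--     subs_rest = _generate_substitutions(rest)
--     out: List[Dict[str, str]] = []
--     for c in CONSTANT_POOL.get(typ, []):
--         for sub in subs_rest:
--             new = sub.copy()
--             new[name] = c
--             out.append(new)
--     return out
-- ===== SOURCE B (Python) =====
-- CONSTANT_POOL = {
--     "person": ["alice", "bob", "carol", "dave", "eve", "frank", "george"],
--     "object": ["apple", "book", "ball", "car", "pencil", "phone"],
--     "entity": [
--         "alice", "bob", "carol", "dave", "eve", "frank", "george",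
--         "apple", "book", "ball", "car", "pencil", "phone"
--     ],
-- }
--
-- def _generate_substitutions(vars_map):
--     subs = [{}]
--     for name, typ in vars_map.items():
--         pool = CONSTANT_POOL.get(typ, [])
--         subs = [{name: c, **sub} for sub in subs for c in pool]
--     return subs
-- ===== Notes on version B (the rewrite author's own statement) =====
-- stated objective: simpler
-- what changed: Replaces A's recursion over the dict (copy/pop the first key per level, recurse, then two nested append loops) by a single iterative left fold: starting from the one empty substitution, each variable expands the list with one flat comprehension, reproducing A's list order and dict key order exactly while avoiding A's per-level dict copy and deep recursion.
import Mathlib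
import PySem

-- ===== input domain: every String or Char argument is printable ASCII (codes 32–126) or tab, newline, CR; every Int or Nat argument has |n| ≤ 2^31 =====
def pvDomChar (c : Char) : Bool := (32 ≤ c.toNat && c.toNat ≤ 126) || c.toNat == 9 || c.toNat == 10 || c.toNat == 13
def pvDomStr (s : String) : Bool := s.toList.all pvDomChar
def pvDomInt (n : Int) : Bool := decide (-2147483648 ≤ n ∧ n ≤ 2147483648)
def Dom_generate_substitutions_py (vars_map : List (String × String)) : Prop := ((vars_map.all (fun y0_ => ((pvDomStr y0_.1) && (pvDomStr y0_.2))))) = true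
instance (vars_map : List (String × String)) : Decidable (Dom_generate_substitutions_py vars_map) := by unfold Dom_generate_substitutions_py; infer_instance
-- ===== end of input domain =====

-- B replaces A's recursion over the dict by a single left-to-right fold with a flat comprehension; objective: simpler.
-- Both ports handle the vars_map dict as its insertion-ordered item list (exact, since Python dict keys are unique — see Pre_).

-- CONSTANT_POOL.get(typ, []) (exact: chained comparison against the three literal keys)
def poolOf (typ : String) : List String :=
  if typ = "person" then ["alice", "bob", "carol", "dave", "eve", "frank", "george"]
  else if typ = "object" then ["apple", "book", "ball", "car", "pencil", "phone"]
  else if typ = "entity" then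
    ["alice", "bob", "carol", "dave", "eve", "frank", "george",
     "apple", "book", "ball", "car", "pencil", "phone"]
  else []

-- ===== PORT A =====
-- next(iter(...)) takes the first item; rest = copy-then-pop(name) is the tail (keys unique under Pre_);
-- new = sub.copy(); new[name] = c appends (name, c) at the end (name is fresh in sub under Pre_).
def generate_substitutions_py (vars_map : List (String × String)) : List (List (String × String)) :=
  match vars_map with
  | [] => [[]]
  | (name, typ) :: rest =>
    let subs_rest := generate_substitutions_py rest
    (poolOf typ).foldl (fun out c =>
      subs_rest.foldl (fun out sub => out ++ [sub ++ [(name, c)]]) out) []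

-- ===== PORT B =====
-- subs = [{}]; for name, typ in vars_map.items(): subs = [{name: c, **sub} for sub in subs for c in pool]
-- ({name: c, **sub} = (name, c) :: sub, exact since name is fresh in sub under Pre_)
def generate_substitutions_py_alt (vars_map : List (String × String)) : List (List (String × String)) :=
  vars_map.foldl (fun subs nt =>
    subs.flatMap (fun sub => (poolOf nt.2).map (fun c => (nt.1, c) :: sub))) [[]]

-- ===== PRECONDITION & SPEC =====
-- Pre_ excludes association lists with duplicate keys: they do not represent any Python dict
-- (a dict's keys are unique), so neither program is ever run on them.
def Pre_generate_substitutions_py (vars_map : List (String × String)) : Prop :=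
  (vars_map.map Prod.fst).Nodup
instance (vars_map : List (String × String)) : Decidable (Pre_generate_substitutions_py vars_map) := by unfold Pre_generate_substitutions_py; infer_instance

def pvWitness_generate_substitutions_py : (List (String × String)) := [("x", "person"), ("y", "object")]

def Spec_generate_substitutions_py (vars_map : List (String × String)) (out : List (List (String × String))) : Prop := out = generate_substitutions_py_alt vars_map
instance (vars_map : List (String × String)) (out : List (List (String × String))) : Decidable (Spec_generate_substitutions_py vars_map out) := by unfold Spec_generate_substitutions_py; infer_instance

-- ===== CLAIM (what is proved, stated in full; the proofs are below) =====
def Claim_equal_generate_substitutions_py : Prop := ∀ (vars_map : List (String × String)), Dom_generate_substitutions_py vars_map → Pre_generate_substitutions_py vars_map → Spec_generate_substitutions_py vars_map (generate_substitutions_py vars_map)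

-- ===== LEMMAS AND PROOFS =====

-- A's inner loop appends one element per sub: it is acc ++ map.
theorem foldl_append_one {α β : Type} (f : α → β) (l : List α) (acc : List β) :
    l.foldl (fun out x => out ++ [f x]) acc = acc ++ l.map f := by
  induction l generalizing acc with
  | nil => simp
  | cons x xs ih => simp [List.foldl_cons, ih]

-- A's outer loop appends a block per constant: it is acc ++ flatMap.
theorem foldl_append_block {α β : Type} (g : α → List β) (l : List α) (acc : List β) :
    l.foldl (fun out x => out ++ g x) acc = acc ++ l.flatMap g := by
  induction l generalizing acc with
  | nil => simp
  | cons x xs ih => simp [List.foldl_cons, ih]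

-- A's recursive step in flatMap form.
theorem portA_cons (name typ : String) (rest : List (String × String)) :
    generate_substitutions_py ((name, typ) :: rest) =
      (poolOf typ).flatMap (fun c =>
        (generate_substitutions_py rest).map (fun sub => sub ++ [(name, c)])) := by
  show (poolOf typ).foldl (fun out c =>
      (generate_substitutions_py rest).foldl (fun out sub => out ++ [sub ++ [(name, c)]]) out) []
    = _
  have h : (fun (out : List (List (String × String))) (c : String) =>
        (generate_substitutions_py rest).foldl (fun out sub => out ++ [sub ++ [(name, c)]]) out)
      = (fun out c =>
          out ++ (generate_substitutions_py rest).map (fun sub => sub ++ [(name, c)])) :=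
    funext fun out => funext fun c => foldl_append_one _ _ _
  rw [h, foldl_append_block]
  simp

-- B's fold from an arbitrary accumulator: each final substitution is a fresh block glued onto a seed.
theorem portB_general (l : List (String × String)) (S : List (List (String × String))) :
    l.foldl (fun subs nt =>
        subs.flatMap (fun sub => (poolOf nt.2).map (fun c => (nt.1, c) :: sub))) S
      = S.flatMap (fun s =>
          (l.foldl (fun subs nt =>
            subs.flatMap (fun sub => (poolOf nt.2).map (fun c => (nt.1, c) :: sub))) [[]]).map
            (fun b => b ++ s)) := by
  induction l generalizing S with
  | nil => simp
  | cons v vs ih =>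
    rw [List.foldl_cons, ih]
    conv_rhs => rw [List.foldl_cons, ih]
    simp [List.flatMap_assoc, List.flatMap_map, List.map_flatMap, List.map_map, Function.comp_def, List.append_assoc]

-- B's step in the same flatMap form as A's.
theorem portB_cons (name typ : String) (rest : List (String × String)) :
    generate_substitutions_py_alt ((name, typ) :: rest) =
      (poolOf typ).flatMap (fun c =>
        (generate_substitutions_py_alt rest).map (fun sub => sub ++ [(name, c)])) := by
  show List.foldl _ _ ((name, typ) :: rest) = _
  rw [List.foldl_cons, portB_general]
  simp [generate_substitutions_py_alt, List.flatMap_map]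

theorem portA_eq_portB (vars_map : List (String × String)) :
    generate_substitutions_py vars_map = generate_substitutions_py_alt vars_map := by
  induction vars_map with
  | nil => rfl
  | cons v rest ih =>
    obtain ⟨name, typ⟩ := v
    rw [portA_cons, portB_cons, ih]

-- ===== VERDICT (by name: the statement is the Claim_ definition above) =====
theorem generate_substitutions_py_spec : Claim_equal_generate_substitutions_py := by
  intro vars_map _ _
  exact portA_eq_portB vars_map
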